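-- pv_equiv track=rewrite | github.com/Samkanja/solutions | string/love-LetterMystery.py | theLoveLetterMystery
-- ===== SOURCE A (Python) =====
-- def theLoveLetterMystery(s:str) -> int:
--     count = 0
--     l = 0
--     r = len(s)-1
--     while l<=r:
--         if s[l] != s[r]:
--             count += abs(ord(s[l])-ord(s[r]))
--         r -= 1
--         l += 1
--     return count
-- ===== SOURCE B (Python) =====
-- def theLoveLetterMystery(s: str) -> int:
--     # Full-string pass: zip s with its reverse, sum all mirrored diffs, halve.
--     return sum(abs(ord(a) - ord(b)) for a, b in zip(s, reversed(s))) // 2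
-- ===== Notes on version B (the rewrite author's own statement) =====
-- stated objective: simpler
-- what changed: Replaces the explicit two-pointer half-loop with a one-line full traversal: zip the string against its reverse, sum abs char diffs over ALL positions (each pair counted twice, the center 0), and integer-divide by 2.
import Mathlib
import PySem

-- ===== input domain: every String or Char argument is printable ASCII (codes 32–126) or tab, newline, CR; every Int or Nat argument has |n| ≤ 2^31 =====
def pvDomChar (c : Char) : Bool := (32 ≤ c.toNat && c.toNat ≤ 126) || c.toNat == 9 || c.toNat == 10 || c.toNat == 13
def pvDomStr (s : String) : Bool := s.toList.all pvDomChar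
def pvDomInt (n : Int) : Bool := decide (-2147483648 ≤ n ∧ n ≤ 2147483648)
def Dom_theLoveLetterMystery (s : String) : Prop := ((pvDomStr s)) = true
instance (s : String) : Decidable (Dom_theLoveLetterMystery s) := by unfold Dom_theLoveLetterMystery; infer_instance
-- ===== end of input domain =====

-- B replaces A's explicit two-pointer half-loop by a full zip-with-reverse pass whose
-- doubled total is halved with // 2; objective: simpler (same O(n) cost).

-- ===== PORT A =====
-- the while loop of A: l walks up, r walks down, count accumulates
def pvALoop (xs : List Char) (count : Int) (l r : Int) : Int :=
  if _h : l ≤ r then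
    pvALoop xs
      (if PySem.List.pyGetD xs l ' ' ≠ PySem.List.pyGetD xs r ' '
       then count + |((PySem.List.pyGetD xs l ' ').toNat : Int) - ((PySem.List.pyGetD xs r ' ').toNat : Int)|
       else count)
      (l + 1) (r - 1)
  else count
termination_by (r - l + 1).toNat
decreasing_by all_goals omega

def theLoveLetterMystery (s : String) : Int :=
  pvALoop s.toList 0 0 (PySem.Str.len s - 1)

-- ===== PORT B =====
def theLoveLetterMystery_alt (s : String) : Int :=
  PySem.Int.floordiv
    (((s.toList.zip s.toList.reverse).map
        (fun p => |((p.1.toNat : Int)) - ((p.2.toNat : Int))|)).sum)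
    2

-- ===== PRECONDITION & SPEC =====
def Spec_theLoveLetterMystery (s : String) (out : Int) : Prop := out = theLoveLetterMystery_alt s
instance (s : String) (out : Int) : Decidable (Spec_theLoveLetterMystery s out) := by unfold Spec_theLoveLetterMystery; infer_instance

-- ===== CLAIM (what is proved, stated in full; the proofs are below) =====
def Claim_equal_theLoveLetterMystery : Prop := ∀ (s : String), Dom_theLoveLetterMystery s → Spec_theLoveLetterMystery s (theLoveLetterMystery s)

-- ===== LEMMAS AND PROOFS =====

-- the accumulator is additive
theorem pvALoop_acc (xs : List Char) (c l r : Int) :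
    pvALoop xs c l r = c + pvALoop xs 0 l r := by
  by_cases h : l ≤ r
  · conv_lhs => rw [pvALoop]
    conv_rhs => rw [pvALoop]
    rw [dif_pos h, dif_pos h,
      pvALoop_acc xs
        (if PySem.List.pyGetD xs l ' ' ≠ PySem.List.pyGetD xs r ' '
         then c + |((PySem.List.pyGetD xs l ' ').toNat : Int) - ((PySem.List.pyGetD xs r ' ').toNat : Int)|
         else c) (l + 1) (r - 1),
      pvALoop_acc xs
        (if PySem.List.pyGetD xs l ' ' ≠ PySem.List.pyGetD xs r ' '
         then 0 + |((PySem.List.pyGetD xs l ' ').toNat : Int) - ((PySem.List.pyGetD xs r ' ').toNat : Int)|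
         else 0) (l + 1) (r - 1)]
    split_ifs <;> ring
  · conv_lhs => rw [pvALoop]
    conv_rhs => rw [pvALoop]
    rw [dif_neg h, dif_neg h]; ring
termination_by (r - l + 1).toNat
decreasing_by all_goals omega

-- indexing inside the frame a :: (ys ++ [b]) at 1 ≤ i ≤ ys.length hits ys
theorem pvGet_frame (a b : Char) (ys : List Char) (i : Int)
    (h1 : 1 ≤ i) (h2 : i ≤ (ys.length : Int)) :
    PySem.List.pyGetD (a :: (ys ++ [b])) i ' ' = PySem.List.pyGetD ys (i - 1) ' ' := by
  obtain ⟨m, rfl⟩ : ∃ m : Nat, i = ((m : Int) + 1) := ⟨(i - 1).toNat, by omega⟩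
  simp only [add_sub_cancel_right]
  rw [show ((m : Int) + 1) = ((m + 1 : Nat) : Int) by push_cast; ring]
  simp only [PySem.List.pyGetD_natCast, List.getD_cons_succ]
  exact List.getD_append ys [b] ' ' m (by omega)

-- running the loop on the frame at indices 1..ys.length is running it on ys shifted
theorem pvALoop_shift (a b : Char) (ys : List Char) (c l r : Int)
    (h1 : 1 ≤ l) (h2 : r ≤ (ys.length : Int)) :
    pvALoop (a :: (ys ++ [b])) c l r = pvALoop ys c (l - 1) (r - 1) := by
  by_cases h : l ≤ r
  · conv_lhs => rw [pvALoop]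
    conv_rhs => rw [pvALoop]
    rw [dif_pos h, dif_pos (by omega : l - 1 ≤ r - 1),
      pvGet_frame a b ys l h1 (by omega), pvGet_frame a b ys r (by omega) h2,
      pvALoop_shift a b ys _ (l + 1) (r - 1) (by omega) (by omega)]
    congr 1; omega
  · conv_lhs => rw [pvALoop]
    conv_rhs => rw [pvALoop]
    rw [dif_neg h, dif_neg (by omega : ¬ (l - 1 ≤ r - 1))]
termination_by (r - l + 1).toNat
decreasing_by all_goals omega

-- the key halving identity, by induction from both ends of the list
theorem pvHalf (xs : List Char) :
    ((xs.zip xs.reverse).map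
        (fun p => |((p.1.toNat : Int)) - ((p.2.toNat : Int))|)).sum
      = 2 * pvALoop xs 0 0 ((xs.length : Int) - 1) := by
  induction xs using List.bidirectionalRec with
  | nil => simp [pvALoop]
  | singleton a => simp [pvALoop]
  | cons_append a ys b ih =>
    -- left side: peel the outer pair off both ends of the zip
    have hzip : (a :: (ys ++ [b])).zip (a :: (ys ++ [b])).reverse
        = (a, b) :: (ys.zip ys.reverse ++ [(b, a)]) := by
      rw [show (a :: (ys ++ [b])).reverse = b :: (ys.reverse ++ [a]) by simp]
      rw [List.zip_cons_cons, List.zip_append (by simp)]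
      simp
    -- right side: one loop step, then shift into ys
    have hget0 : PySem.List.pyGetD (a :: (ys ++ [b])) 0 ' ' = a :=
      PySem.List.pyGetD_zero_cons a (ys ++ [b]) ' '
    have hgetn : PySem.List.pyGetD (a :: (ys ++ [b])) ((ys.length : Int) + 1) ' ' = b := by
      rw [show ((ys.length : Int) + 1) = ((ys.length + 1 : Nat) : Int) by push_cast; ring]
      simp only [PySem.List.pyGetD_natCast, List.getD_cons_succ]
      rw [List.getD_eq_getElem _ _ (by simp)]
      simp
    have hloop : pvALoop (a :: (ys ++ [b])) 0 0 (((a :: (ys ++ [b])).length : Int) - 1)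
        = |((a.toNat : Int)) - (b.toNat : Int)| + pvALoop ys 0 0 ((ys.length : Int) - 1) := by
      have hr : ((a :: (ys ++ [b])).length : Int) - 1 = (ys.length : Int) + 1 := by
        simp only [List.length_cons, List.length_append, List.length_nil]; push_cast; ring
      rw [hr]
      conv_lhs => rw [pvALoop]
      rw [dif_pos (by omega), hget0]
      rw [show ((ys.length : Int) + 1 - 1) = (ys.length : Int) by ring, hgetn]
      rw [show ((0 : Int) + 1) = 1 by ring]
      rw [pvALoop_shift a b ys _ 1 (ys.length : Int) le_rfl le_rfl]
      rw [show ((1 : Int) - 1) = 0 by ring]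
      rw [pvALoop_acc]
      split_ifs with hab
      · ring
      · rw [not_not.mp hab]; simp
    rw [hzip, hloop]
    simp only [List.map_append, List.sum_cons, List.sum_append,
      List.map, List.sum_nil]
    rw [ih, abs_sub_comm ((b.toNat : Int)) ((a.toNat : Int))]
    ring

-- ===== VERDICT (by name: the statement is the Claim_ definition above) =====
theorem theLoveLetterMystery_spec : Claim_equal_theLoveLetterMystery := by
  intro s _
  unfold Spec_theLoveLetterMystery theLoveLetterMystery theLoveLetterMystery_alt
  rw [pvHalf, PySem.Str.len_eq]
  rw [PySem.Int.floordiv_eq_ediv_of_pos (by norm_num)]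
  rw [Int.mul_ediv_cancel_left _ (by norm_num)]
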